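-- pv_equiv track=rewrite | github.com/holylight1979/ai-kb-c-to-csharp | tools/cstr_replacer.py | build_reverse_map
-- ===== SOURCE A (Python) =====
-- from collections import defaultdict
--
-- def build_reverse_map(constants, preferred_prefix=None):
--     """Build value -> constant name mapping with priority selection."""
--     value_to_names = defaultdict(list)
--     for name, value in constants.items():
--         value_to_names[value].append(name)
--
--     reverse_map = {}
--     for value, names in value_to_names.items():
--         if len(names) == 1:
--             reverse_map[value] = names[0]
--         else:
--             selected = None
--             if preferred_prefix:
--                 matches = [n for n in names if n.startswith(preferred_prefix + '_')]
--                 if matches: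
--                     selected = matches[0]
--             if not selected:
--                 muse = [n for n in names if n.startswith('M_USE_')]
--                 if muse:
--                     selected = muse[0]
--             reverse_map[value] = selected or names[0]
--
--     return reverse_map
-- ===== SOURCE B (Python) =====
-- def build_reverse_map(constants, preferred_prefix=None):
--     """Build value -> constant name mapping with priority selection."""
--     reverse_map = {}
--     best_tier = {}
--     for name, value in constants.items():
--         if preferred_prefix and name.startswith(preferred_prefix + '_'):
--             tier = 2
--         elif name.startswith('M_USE_'):
--             tier = 1
--         else:
--             tier = 0
--         if value not in reverse_map or tier > best_tier[value]:
--             reverse_map[value] = name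
--             best_tier[value] = tier
--     return reverse_map
-- ===== Notes on version B (the rewrite author's own statement) =====
-- stated objective: simpler
-- what changed: Replaces A's two-phase group-by-value-then-filter selection with a single streaming pass that keeps, per value, the earliest name of the highest priority tier (2 = preferred prefix, 1 = M_USE_, 0 = other).
import Mathlib
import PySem

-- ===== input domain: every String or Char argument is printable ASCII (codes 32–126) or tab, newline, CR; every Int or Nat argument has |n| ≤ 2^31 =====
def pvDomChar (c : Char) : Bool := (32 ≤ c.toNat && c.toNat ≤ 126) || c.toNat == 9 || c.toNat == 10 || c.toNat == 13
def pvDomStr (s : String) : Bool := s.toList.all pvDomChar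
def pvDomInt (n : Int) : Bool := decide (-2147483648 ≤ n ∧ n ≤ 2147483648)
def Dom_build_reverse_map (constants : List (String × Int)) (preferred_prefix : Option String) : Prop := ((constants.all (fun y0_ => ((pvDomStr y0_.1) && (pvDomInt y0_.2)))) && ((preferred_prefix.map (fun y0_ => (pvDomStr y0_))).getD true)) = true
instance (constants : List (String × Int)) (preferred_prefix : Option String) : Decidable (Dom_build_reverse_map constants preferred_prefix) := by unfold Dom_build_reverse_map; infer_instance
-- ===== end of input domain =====

-- B replaces A's two-phase group-then-select pass by a single streaming pass that keeps, per value,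
-- the earliest name of the highest priority tier (objective: simpler one-pass decomposition, same cost).

-- ===== PORT A =====
-- A's per-value selection (the body of A's second loop: the single-name case, the
-- preferred-prefix filter, the M_USE_ filter, and `selected or names[0]`).
-- Python truthiness of `preferred_prefix` (None and "" are falsy) is `preferred_prefix.getD "" ≠ ""`;
-- `selected or names[0]` is `selected.getD (names.headD "")` since a selected name starts with a
-- nonempty prefix, hence is a nonempty (truthy) string.
def pvSelA (preferred_prefix : Option String) (names : List String) : String :=
  if names.length = 1 then names.headD ""
  else
    let selected : Option String :=
      if preferred_prefix.getD "" ≠ "" then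
        match names.filter (fun n => PySem.Str.startswith n (preferred_prefix.getD "" ++ "_")) with
        | m :: _ => some m
        | [] => none
      else none
    let selected : Option String :=
      if selected.isNone then
        match names.filter (fun n => PySem.Str.startswith n "M_USE_") with
        | m :: _ => some m
        | [] => none
      else selected
    selected.getD (names.headD "")

-- `constants` is a Python dict: normalised via Dict.ofList (duplicate keys overwrite in place).
def build_reverse_map (constants : List (String × Int)) (preferred_prefix : Option String) : List (Int × String) :=
  let value_to_names : PySem.Dict Int (List String) :=
    (PySem.Dict.ofList constants).items.foldl
      (fun d p => d.modify p.2 [] (fun ns => ns ++ [p.1])) PySem.Dict.empty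
  let reverse_map : PySem.Dict Int String :=
    value_to_names.items.foldl (fun rm q => rm.insert q.1 (pvSelA preferred_prefix q.2)) PySem.Dict.empty
  reverse_map.items

-- ===== PORT B =====
-- priority tier of a name (2 = preferred prefix, 1 = M_USE_, 0 = anything else)
def pvTier (preferred_prefix : Option String) (name : String) : Int :=
  if preferred_prefix.getD "" ≠ "" ∧ PySem.Str.startswith name (preferred_prefix.getD "" ++ "_") = true then 2
  else if PySem.Str.startswith name "M_USE_" = true then 1
  else 0

def build_reverse_map_alt (constants : List (String × Int)) (preferred_prefix : Option String) : List (Int × String) :=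
  (((PySem.Dict.ofList constants).items.foldl
      (fun (st : PySem.Dict Int String × PySem.Dict Int Int) p =>
        let tier := pvTier preferred_prefix p.1
        if !(st.1.contains p.2) || decide (st.2.getD p.2 0 < tier) then
          (st.1.insert p.2 p.1, st.2.insert p.2 tier)
        else st)
      (PySem.Dict.empty, PySem.Dict.empty)).1).items

-- ===== PRECONDITION & SPEC =====
def Spec_build_reverse_map (constants : List (String × Int)) (preferred_prefix : Option String) (out : List (Int × String)) : Prop := out = build_reverse_map_alt constants preferred_prefix
instance (constants : List (String × Int)) (preferred_prefix : Option String) (out : List (Int × String)) : Decidable (Spec_build_reverse_map constants preferred_prefix out) := by unfold Spec_build_reverse_map; infer_instance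

-- ===== CLAIM (what is proved, stated in full; the proofs are below) =====
def Claim_equal_build_reverse_map : Prop := ∀ (constants : List (String × Int)) (preferred_prefix : Option String), Dom_build_reverse_map constants preferred_prefix → Spec_build_reverse_map constants preferred_prefix (build_reverse_map constants preferred_prefix)

-- ===== LEMMAS AND PROOFS =====

-- names of a given value, in list order (what A's grouping phase collects per value)
def pvNames (l : List (String × Int)) (v : Int) : List String :=
  (l.filter (fun p => p.2 == v)).map (fun p => p.1)

-- B's per-value update step and its fold over a name list
def pvStep (pp : Option String) (c : String × Int) (n : String) : String × Int :=
  if c.2 < pvTier pp n then (n, pvTier pp n) else c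

def pvBest (pp : Option String) (ns : List String) : String × Int :=
  ns.foldl (pvStep pp) ("", -1)

-- the filter-based selection both sides compute per value
def pvChoose (pp : Option String) (ns : List String) : String :=
  match ns.filter (fun n => pvTier pp n == 2) with
  | m :: _ => m
  | [] =>
    match ns.filter (fun n => pvTier pp n == 1) with
    | m :: _ => m
    | [] => ns.headD ""

theorem pvTier_nonneg (pp : Option String) (n : String) : 0 ≤ pvTier pp n := by
  unfold pvTier; split_ifs <;> omega
theorem pvTier_le_two (pp : Option String) (n : String) : pvTier pp n ≤ 2 := by
  unfold pvTier; split_ifs <;> omega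

theorem pvStay (pp : Option String) : ∀ (ns : List String) (c : String × Int),
    (∀ n ∈ ns, pvTier pp n ≤ c.2) → ns.foldl (pvStep pp) c = c := by
  intro ns
  induction ns with
  | nil => intro c _; rfl
  | cons n ns ih =>
    intro c h
    have h1 : pvTier pp n ≤ c.2 := h n (List.mem_cons_self ..)
    have hs : pvStep pp c n = c := by unfold pvStep; rw [if_neg (by omega)]
    simp only [List.foldl_cons, hs]
    exact ih c (fun m hm => h m (List.mem_cons_of_mem _ hm))

theorem pvL2 (pp : Option String) : ∀ (ns : List String) (c : String × Int) (m : String)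
    (rest : List String), c.2 < 2 → ns.filter (fun n => pvTier pp n == 2) = m :: rest →
    ns.foldl (pvStep pp) c = (m, 2) := by
  intro ns
  induction ns with
  | nil => intro c m rest _ h; simp at h
  | cons n ns ih =>
    intro c m rest hc hf
    by_cases h2 : pvTier pp n = 2
    · rw [List.filter_cons_of_pos (by simpa using h2)] at hf
      injection hf with he _
      subst he
      have hs : pvStep pp c n = (n, 2) := by unfold pvStep; rw [if_pos (by omega), h2]
      simp only [List.foldl_cons, hs]
      exact pvStay pp ns (n, 2) (fun x _ => pvTier_le_two pp x)
    · rw [List.filter_cons_of_neg (by simpa using h2)] at hf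
      have hle : pvTier pp n ≤ 1 := by
        have := pvTier_le_two pp n; have := pvTier_nonneg pp n; omega
      simp only [List.foldl_cons]
      apply ih _ m rest _ hf
      unfold pvStep
      split
      · simpa using (show pvTier pp n < 2 by omega)
      · exact hc

theorem pvL1 (pp : Option String) : ∀ (ns : List String) (c : String × Int) (m : String)
    (rest : List String), c.2 < 1 → ns.filter (fun n => pvTier pp n == 2) = [] →
    ns.filter (fun n => pvTier pp n == 1) = m :: rest →
    ns.foldl (pvStep pp) c = (m, 1) := by
  intro ns
  induction ns with
  | nil => intro c m rest _ _ h; simp at h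
  | cons n ns ih =>
    intro c m rest hc hf2 hf1
    have h2 : pvTier pp n ≠ 2 := by
      intro h
      rw [List.filter_cons_of_pos (by simpa using h)] at hf2
      simp at hf2
    rw [List.filter_cons_of_neg (by simpa using h2)] at hf2
    by_cases h1 : pvTier pp n = 1
    · rw [List.filter_cons_of_pos (by simpa using h1)] at hf1
      injection hf1 with he _
      subst he
      have hs : pvStep pp c n = (n, 1) := by unfold pvStep; rw [if_pos (by omega), h1]
      simp only [List.foldl_cons, hs]
      apply pvStay
      intro x hx
      have : pvTier pp x ≠ 2 := by
        intro h
        have : x ∈ ns.filter (fun n => pvTier pp n == 2) := by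
          simp [List.mem_filter, hx, h]
        rw [hf2] at this; simp at this
      have := pvTier_le_two pp x; omega
    · rw [List.filter_cons_of_neg (by simpa using h1)] at hf1
      have h0 : pvTier pp n = 0 := by
        have := pvTier_le_two pp n; have := pvTier_nonneg pp n; omega
      simp only [List.foldl_cons]
      apply ih _ m rest _ hf2 hf1
      unfold pvStep
      split
      · simpa using (show pvTier pp n < 1 by omega)
      · exact hc

theorem pvTier_eq_zero (pp : Option String) (n : String)
    (h2 : pvTier pp n ≠ 2) (h1 : pvTier pp n ≠ 1) : pvTier pp n = 0 := by
  have := pvTier_le_two pp n; have := pvTier_nonneg pp n; omega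

theorem pvBest_eq_choose (pp : Option String) (ns : List String) (h : ns ≠ []) :
    (pvBest pp ns).1 = pvChoose pp ns := by
  unfold pvChoose
  cases hf2 : ns.filter (fun n => pvTier pp n == 2) with
  | cons m rest => rw [pvBest, pvL2 pp ns _ m rest (by norm_num) hf2]
  | nil =>
    cases hf1 : ns.filter (fun n => pvTier pp n == 1) with
    | cons m rest => rw [pvBest, pvL1 pp ns _ m rest (by norm_num) hf2 hf1]
    | nil =>
      have hz : ∀ x ∈ ns, pvTier pp x = 0 := by
        intro x hx
        apply pvTier_eq_zero
        · intro hc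
          have : x ∈ ns.filter (fun n => pvTier pp n == 2) := by simp [List.mem_filter, hx, hc]
          rw [hf2] at this; simp at this
        · intro hc
          have : x ∈ ns.filter (fun n => pvTier pp n == 1) := by simp [List.mem_filter, hx, hc]
          rw [hf1] at this; simp at this
      cases ns with
      | nil => exact absurd rfl h
      | cons a tl =>
        have ha : pvTier pp a = 0 := hz a (List.mem_cons_self ..)
        have hs : pvStep pp ("", -1) a = (a, 0) := by
          unfold pvStep; rw [if_pos (by omega), ha]
        rw [pvBest]
        simp only [List.foldl_cons, hs]
        rw [pvStay pp tl (a, 0) (fun x hx => by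
          rw [hz x (List.mem_cons_of_mem _ hx)])]
        rfl

theorem pvFilter2_eq (pp : Option String) (hp : pp.getD "" ≠ "") (ns : List String) :
    ns.filter (fun n => PySem.Str.startswith n (pp.getD "" ++ "_"))
      = ns.filter (fun n => pvTier pp n == 2) := by
  apply List.filter_congr
  intro n _
  unfold pvTier
  split_ifs with h1 h2 <;> simp_all

theorem pvFilter2_nil (pp : Option String) (hp : ¬ pp.getD "" ≠ "") (ns : List String) :
    ns.filter (fun n => pvTier pp n == 2) = [] := by
  apply List.filter_eq_nil_iff.2
  intro n _
  unfold pvTier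
  split_ifs with h1 h2 <;> simp_all

theorem pvFilter1_eq (pp : Option String) (ns : List String)
    (h2 : ns.filter (fun n => pvTier pp n == 2) = []) :
    ns.filter (fun n => PySem.Str.startswith n "M_USE_")
      = ns.filter (fun n => pvTier pp n == 1) := by
  apply List.filter_congr
  intro n hn
  have hn2 : pvTier pp n ≠ 2 := by
    intro hc
    have : n ∈ ns.filter (fun n => pvTier pp n == 2) := by simp [List.mem_filter, hn, hc]
    rw [h2] at this; simp at this
  unfold pvTier at hn2 ⊢
  split_ifs with h1 hb <;> simp_all

theorem pvChoose_singleton (pp : Option String) (a : String) : pvChoose pp [a] = a := by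
  unfold pvChoose
  by_cases h2 : pvTier pp a = 2
  · simp [h2]
  · by_cases h1 : pvTier pp a = 1 <;>
      simp [h2, h1]

theorem pvSelA_eq_choose (pp : Option String) (ns : List String) (h : ns ≠ []) :
    pvSelA pp ns = pvChoose pp ns := by
  unfold pvSelA
  by_cases hlen : ns.length = 1
  · obtain ⟨a, rfl⟩ := List.length_eq_one_iff.1 hlen
    rw [if_pos hlen, pvChoose_singleton]
    rfl
  · rw [if_neg hlen]
    by_cases hp : pp.getD "" ≠ ""
    · rw [if_pos hp, pvFilter2_eq pp hp]
      cases hf2 : ns.filter (fun n => pvTier pp n == 2) with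
      | cons m rest => simp [pvChoose, hf2]
      | nil =>
        rw [pvFilter1_eq pp ns hf2]
        cases hf1 : ns.filter (fun n => pvTier pp n == 1) with
        | cons m rest => simp [pvChoose, hf2, hf1]
        | nil => simp [pvChoose, hf2, hf1]
    · rw [if_neg hp]
      have hf2 := pvFilter2_nil pp hp ns
      rw [pvFilter1_eq pp ns hf2]
      cases hf1 : ns.filter (fun n => pvTier pp n == 1) with
      | cons m rest => simp [pvChoose, hf2, hf1]
      | nil => simp [pvChoose, hf2, hf1]

theorem pvNames_append (l : List (String × Int)) (p : String × Int) (v : Int) :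
    pvNames (l ++ [p]) v = pvNames l v ++ (if p.2 = v then [p.1] else []) := by
  unfold pvNames
  rw [List.filter_append, List.filter_singleton, List.map_append]
  by_cases h : p.2 = v <;> simp [h, Bool.cond_eq_ite]

theorem pvNames_nil_of_not_mem (l : List (String × Int)) (v : Int)
    (h : v ∉ l.map (fun p => p.2)) : pvNames l v = [] := by
  unfold pvNames
  rw [List.filter_eq_nil_iff.2, List.map_nil]
  intro p hp
  simp only [beq_iff_eq]
  intro hc
  exact h (List.mem_map.2 ⟨p, hp, by simp [hc]⟩)

theorem pvNames_ne_nil_of_mem (l : List (String × Int)) (v : Int)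
    (h : v ∈ l.map (fun p => p.2)) : pvNames l v ≠ [] := by
  obtain ⟨p, hp, hv⟩ := List.mem_map.1 h
  unfold pvNames
  simp only [ne_eq, List.map_eq_nil_iff, List.filter_eq_nil_iff]
  intro hc
  exact hc p hp (by simp [hv])

theorem pvBest_append (pp : Option String) (ns : List String) (n : String) :
    pvBest pp (ns ++ [n]) = pvStep pp (pvBest pp ns) n := by
  unfold pvBest; rw [List.foldl_append]; rfl

theorem pvB_inv (pp : Option String) (l : List (String × Int)) :
    (l.foldl
      (fun (st : PySem.Dict Int String × PySem.Dict Int Int) p =>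
        let tier := pvTier pp p.1
        if !(st.1.contains p.2) || decide (st.2.getD p.2 0 < tier) then
          (st.1.insert p.2 p.1, st.2.insert p.2 tier)
        else st)
      (PySem.Dict.empty, PySem.Dict.empty)).1.items
      = (PySem.Set.ofList (l.map (fun p => p.2))).map (fun v => (v, (pvBest pp (pvNames l v)).1))
    ∧ (∀ v ∈ PySem.Set.ofList (l.map (fun p => p.2)),
        (l.foldl
          (fun (st : PySem.Dict Int String × PySem.Dict Int Int) p =>
            let tier := pvTier pp p.1
            if !(st.1.contains p.2) || decide (st.2.getD p.2 0 < tier) then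
              (st.1.insert p.2 p.1, st.2.insert p.2 tier)
            else st)
          (PySem.Dict.empty, PySem.Dict.empty)).2.getD v 0 = (pvBest pp (pvNames l v)).2)
    ∧ (∀ v : Int,
        (l.foldl
          (fun (st : PySem.Dict Int String × PySem.Dict Int Int) p =>
            let tier := pvTier pp p.1
            if !(st.1.contains p.2) || decide (st.2.getD p.2 0 < tier) then
              (st.1.insert p.2 p.1, st.2.insert p.2 tier)
            else st)
          (PySem.Dict.empty, PySem.Dict.empty)).1.contains v
          = decide (v ∈ PySem.Set.ofList (l.map (fun p => p.2)))) := by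
  induction l using List.reverseRecOn with
  | nil =>
    refine ⟨rfl, ?_, ?_⟩
    · intro v hv; simp [PySem.Set.ofList] at hv
    · intro v; simp [PySem.Dict.contains_empty, PySem.Set.ofList]
  | append_singleton l p ih =>
    obtain ⟨ih1, ih2, ih3⟩ := ih
    rw [List.foldl_append] at *
    set F := (fun (st : PySem.Dict Int String × PySem.Dict Int Int) (p : String × Int) =>
        let tier := pvTier pp p.1
        if !(st.1.contains p.2) || decide (st.2.getD p.2 0 < tier) then
          (st.1.insert p.2 p.1, st.2.insert p.2 tier)
        else st) with hF
    set S := (l.foldl F (PySem.Dict.empty, PySem.Dict.empty)) with hS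
    have hV' : PySem.Set.ofList ((l ++ [p]).map (fun p => p.2))
        = (PySem.Set.ofList (l.map (fun p => p.2))).add p.2 := by
      rw [List.map_append, PySem.Set.ofList_append, List.map_singleton,
        PySem.Set.update_cons, PySem.Set.update_nil]
    set V := PySem.Set.ofList (l.map (fun p => p.2)) with hVdef
    simp only [List.foldl_cons, List.foldl_nil]
    by_cases hm : p.2 ∈ V
    · have hVeq : V.add p.2 = V := by
        unfold PySem.Set.add
        rw [if_pos (by simpa using hm)]
      have hcont : S.1.contains p.2 = true := by rw [ih3]; simpa using hm
      have hgd : S.2.getD p.2 0 = (pvBest pp (pvNames l p.2)).2 := ih2 p.2 hm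
      by_cases hlt : (pvBest pp (pvNames l p.2)).2 < pvTier pp p.1
      · have hFS : F S p = (S.1.insert p.2 p.1, S.2.insert p.2 (pvTier pp p.1)) := by
          rw [hF]; simp only [hcont, hgd, hlt, decide_true, Bool.or_true]; rfl
        rw [hFS, hV', hVeq]
        refine ⟨?_, ?_, ?_⟩
        · rw [PySem.Dict.items_insert_of_contains S.1 p.1 hcont, ih1, List.map_map]
          apply List.map_congr_left
          intro v hv
          by_cases hveq : v = p.2
          · subst hveq
            simp only [Function.comp_apply, beq_self_eq_true, if_pos]
            rw [pvNames_append, if_pos rfl, pvBest_append, pvStep, if_pos hlt]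
          · simp only [Function.comp_apply]
            rw [if_neg (by simpa using fun h => hveq h)]
            rw [pvNames_append, if_neg (fun h => hveq h.symm), List.append_nil]
        · intro v hv
          rw [PySem.Dict.getD_insert]
          by_cases hveq : v = p.2
          · subst hveq
            rw [if_pos rfl, pvNames_append, if_pos rfl, pvBest_append, pvStep, if_pos hlt]
          · rw [if_neg hveq, ih2 v hv, pvNames_append, if_neg (fun h => hveq h.symm),
              List.append_nil]
        · intro v
          rw [PySem.Dict.contains_insert, ih3]
          by_cases hveq : v = p.2
          · subst hveq; simp [hm]
          · simp [hveq]
      · have hFS : F S p = S := by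
          rw [hF]; simp only [hcont, hgd, hlt, decide_false, Bool.or_false, Bool.not_true]
          rfl
        rw [hFS, hV', hVeq]
        refine ⟨?_, ?_, ?_⟩
        · rw [ih1]
          apply List.map_congr_left
          intro v hv
          by_cases hveq : v = p.2
          · subst hveq
            rw [pvNames_append, if_pos rfl, pvBest_append, pvStep, if_neg hlt]
          · rw [pvNames_append, if_neg (fun h => hveq h.symm), List.append_nil]
        · intro v hv
          by_cases hveq : v = p.2
          · subst hveq
            rw [hgd, pvNames_append, if_pos rfl, pvBest_append, pvStep, if_neg hlt]
          · rw [ih2 v hv, pvNames_append, if_neg (fun h => hveq h.symm), List.append_nil]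
        · exact ih3
    · have hVeq : V.add p.2 = V ++ [p.2] := by
        unfold PySem.Set.add
        rw [if_neg (by simpa using hm)]
      have hcont : S.1.contains p.2 = false := by rw [ih3]; simpa using hm
      have hnames : pvNames l p.2 = [] :=
        pvNames_nil_of_not_mem l p.2 (fun h => hm ((PySem.Set.mem_ofList _ _).2 h))
      have hFS : F S p = (S.1.insert p.2 p.1, S.2.insert p.2 (pvTier pp p.1)) := by
        rw [hF]; simp only [hcont, Bool.not_false, Bool.true_or]; rfl
      have hbest : pvBest pp (pvNames (l ++ [p]) p.2) = (p.1, pvTier pp p.1) := by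
        rw [pvNames_append, if_pos rfl, hnames, List.nil_append]
        unfold pvBest
        simp only [List.foldl_cons, List.foldl_nil]
        unfold pvStep
        rw [if_pos (by have := pvTier_nonneg pp p.1; omega)]
      rw [hFS, hV', hVeq]
      refine ⟨?_, ?_, ?_⟩
      · rw [PySem.Dict.items_insert_of_not_contains S.1 p.1 hcont, ih1, List.map_append]
        congr 1
        · apply List.map_congr_left
          intro v hv
          rw [pvNames_append, if_neg (fun h : p.2 = v => hm (h ▸ hv)), List.append_nil]
        · rw [List.map_singleton, hbest]
      · intro v hv
        rw [PySem.Dict.getD_insert]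
        by_cases hveq : v = p.2
        · subst hveq; rw [if_pos rfl, hbest]
        · rw [if_neg hveq]
          have hvV : v ∈ V := by
            rcases List.mem_append.1 hv with h | h
            · exact h
            · simp at h; exact absurd h hveq
          rw [ih2 v hvV, pvNames_append, if_neg (fun h => hveq h.symm), List.append_nil]
      · intro v
        rw [PySem.Dict.contains_insert, ih3]
        by_cases hveq : v = p.2
        · subst hveq; simp
        · simp [hveq]

theorem pvA_items (pp : Option String) (l : List (String × Int)) :
    ((l.foldl (fun d (p : String × Int) => d.modify p.2 [] (fun ns => ns ++ [p.1]))
        PySem.Dict.empty).items.foldl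
      (fun rm q => rm.insert q.1 (pvSelA pp q.2)) PySem.Dict.empty).items
    = (PySem.Set.ofList (l.map (fun p => p.2))).map (fun v => (v, pvSelA pp (pvNames l v))) := by
  set g := (l.foldl (fun d (p : String × Int) => d.modify p.2 [] (fun ns => ns ++ [p.1]))
        PySem.Dict.empty) with hg
  have hkeys : g.keys = PySem.Set.ofList (l.map (fun p => p.2)) := by
    rw [hg, PySem.Dict.keys_foldl_modify_key l (fun p => p.2) [] (fun _ p ns => ns ++ [p.1])
      PySem.Dict.empty, PySem.Dict.keys_empty, PySem.Set.update_nil_left]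
  have hnodup : g.keys.Nodup := by
    rw [hg]
    exact PySem.Dict.nodup_keys_foldl_modify_key l (fun p => p.2) [] (fun _ p ns => ns ++ [p.1])
      PySem.Dict.empty PySem.Dict.nodup_keys_empty
  have hgetD : ∀ v : Int, g.getD v [] = pvNames l v := by
    intro v
    have hswap : g = (l.map Prod.swap).foldl
        (fun d p => d.modify p.1 [] (fun ns => ns ++ [p.2])) PySem.Dict.empty := by
      rw [List.foldl_map]; rfl
    rw [hswap, PySem.Dict.getD_foldl_modify_append, PySem.Dict.getD_empty, List.nil_append,
      List.filter_map, List.map_map]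
    unfold pvNames
    congr 1
  have hfresh := PySem.Dict.items_foldl_insert_fresh g.items (fun q => q.1)
    (fun q => pvSelA pp q.2) PySem.Dict.empty
    (fun a _ => PySem.Dict.contains_empty a.1) (by exact hnodup)
  rw [hfresh]
  have hempty : (PySem.Dict.empty : PySem.Dict Int String).items = [] := rfl
  rw [hempty, List.nil_append, PySem.Dict.items_eq_map_keys g hnodup [], List.map_map, hkeys]
  apply List.map_congr_left
  intro v _
  simp [hgetD v]

-- ===== VERDICT (by name: the statement is the Claim_ definition above) =====
theorem build_reverse_map_spec : Claim_equal_build_reverse_map := by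
  intro constants pp _
  unfold Spec_build_reverse_map build_reverse_map build_reverse_map_alt
  rw [pvA_items pp, (pvB_inv pp (PySem.Dict.ofList constants).items).1]
  apply List.map_congr_left
  intro v hv
  have hne : pvNames (PySem.Dict.ofList constants).items v ≠ [] :=
    pvNames_ne_nil_of_mem _ _ ((PySem.Set.mem_ofList _ _).1 hv)
  rw [pvSelA_eq_choose pp _ hne, pvBest_eq_choose pp _ hne]
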